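-- pv_equiv track=rewrite | github.com/ofreshy/coderbyte | medium/dash_insert.py | DashInsertII
-- ===== SOURCE A (Python) =====
-- def DashInsertII(num):
--     num_str = str(num)
--     odds = '13579'
--     evens = '2468'
--     buf = num_str[0]
--     for c in num_str[1:]:
--         if c in odds and buf[-1] in odds:
--             buf += '-'
--         elif c in evens and buf[-1] in evens:
--             buf += '*'
--         buf += c
--
--     return buf
-- ===== SOURCE B (Python) =====
-- def _sep_pass(s, cls, sep):
--     # one pass: insert sep between every adjacent pair of chars both in cls
--     if len(s) < 2:
--         return s
--     if s[0] in cls and s[1] in cls: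
--         return s[0] + sep + _sep_pass(s[1:], cls, sep)
--     return s[0] + _sep_pass(s[1:], cls, sep)
--
--
-- def DashInsertII(num):
--     # stage 1: dashes between adjacent odd digits; stage 2: stars between
--     # adjacent even digits. The stages are independent: a '-' is only ever
--     # inserted between two odd digits, so it never splits an even-even pair,
--     # and '-' itself belongs to neither class.
--     return _sep_pass(_sep_pass(str(num), '13579', '-'), '2468', '*')
-- ===== Notes on version B (the rewrite author's own statement) =====
-- stated objective: alternative
-- what changed: Replaces A's single stateful loop (an accumulator re-reading its own last character via buf[-1]) with two independent staged passes, each a recursive function inserting one separator kind; correctness of staging rests on dashes only ever landing between two odd digits, so they cannot break an even-even adjacency.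
import Mathlib
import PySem

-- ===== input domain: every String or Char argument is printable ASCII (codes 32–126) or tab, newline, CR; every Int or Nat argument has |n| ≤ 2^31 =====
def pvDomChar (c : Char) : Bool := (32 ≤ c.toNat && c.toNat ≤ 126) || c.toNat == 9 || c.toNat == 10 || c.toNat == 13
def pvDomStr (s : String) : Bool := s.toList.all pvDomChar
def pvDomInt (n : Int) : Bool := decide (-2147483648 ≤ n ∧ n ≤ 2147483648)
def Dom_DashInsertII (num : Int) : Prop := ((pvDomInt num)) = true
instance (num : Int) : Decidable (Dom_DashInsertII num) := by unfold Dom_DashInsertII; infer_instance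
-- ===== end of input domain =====

-- B replaces A's single stateful loop (accumulator re-reading buf[-1]) with two
-- independent staged recursive passes: first insert '-' between adjacent odd digits,
-- then '*' between adjacent even digits (objective: alternative decomposition).

-- ===== PORT A =====
-- odds = '13579', evens = '2468' (single-char membership in these strings = char membership)
def oddsA : List Char := ['1', '3', '5', '7', '9']
def evensA : List Char := ['2', '4', '6', '8']

-- one iteration of A's loop body; buf[-1] via PySem.List.pyGet? buf (-1)
-- (the `none` branch is unreachable: buf starts as [num_str[0]] and only grows)
def stepA (buf : List Char) (c : Char) : List Char :=
  match PySem.List.pyGet? buf (-1) with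
  | none => buf ++ [c]
  | some last =>
    (if c ∈ oddsA ∧ last ∈ oddsA then buf ++ ['-']
     else if c ∈ evensA ∧ last ∈ evensA then buf ++ ['*']
     else buf) ++ [c]

def DashInsertII (num : Int) : String :=
  match PySem.Int.toChars num with          -- num_str; str(num) is never empty, so
  | [] => ""                                -- num_str[0] never raises ([] branch is dead)
  | h :: t => String.ofList ((PySem.List.slice (h :: t) (some 1) none).foldl stepA [h])

-- ===== PORT B =====
-- _sep_pass(s, cls, sep): recursion on the string's char list
def sepPass (cls : List Char) (sep : Char) : List Char → List Char
  | [] => []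
  | [a] => [a]
  | a :: b :: t =>
    if a ∈ cls ∧ b ∈ cls then a :: sep :: sepPass cls sep (b :: t)
    else a :: sepPass cls sep (b :: t)

def DashInsertII_alt (num : Int) : String :=
  String.ofList
    (sepPass ['2', '4', '6', '8'] '*'
      (sepPass ['1', '3', '5', '7', '9'] '-' (PySem.Int.toChars num)))

-- ===== PRECONDITION & SPEC =====
def Spec_DashInsertII (num : Int) (out : String) : Prop := out = DashInsertII_alt num
instance (num : Int) (out : String) : Decidable (Spec_DashInsertII num out) := by unfold Spec_DashInsertII; infer_instance

-- ===== CLAIM =====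
def Claim_equal_DashInsertII : Prop := ∀ (num : Int), Dom_DashInsertII num → Spec_DashInsertII num (DashInsertII num)

-- ===== LEMMAS AND PROOFS =====

-- separator A's loop writes between previous char p and current char c
def sepB (p c : Char) : List Char :=
  if c ∈ oddsA ∧ p ∈ oddsA then ['-']
  else if c ∈ evensA ∧ p ∈ evensA then ['*']
  else []

-- the characters A's loop appends after the seed, as a function of the previous char
def emitSep : Char → List Char → List Char
  | _, [] => []
  | p, c :: t => sepB p c ++ c :: emitSep c t


theorem sepPass_two (cls : List Char) (sep : Char) (a b : Char) (t : List Char) :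
    sepPass cls sep (a :: b :: t) =
      if a ∈ cls ∧ b ∈ cls then a :: sep :: sepPass cls sep (b :: t)
      else a :: sepPass cls sep (b :: t) := rfl

-- buf[-1] of a nonempty list
theorem pyGet_neg_one_concat (l : List Char) (c : Char) :
    PySem.List.pyGet? (l ++ [c]) (-1) = some c := by
  simp [PySem.List.pyGet?, PySem.List.pyIdx?]

theorem stepA_eq (buf : List Char) (p c : Char) (h : PySem.List.pyGet? buf (-1) = some p) :
    stepA buf c = (buf ++ sepB p c) ++ [c] := by
  unfold stepA sepB
  rw [h]
  by_cases h1 : c ∈ oddsA <;> by_cases h2 : p ∈ oddsA <;>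
    by_cases h3 : c ∈ evensA <;> by_cases h4 : p ∈ evensA <;>
    simp [oddsA, evensA, and_comm] at * <;> simp_all

theorem foldl_stepA (t : List Char) : ∀ (buf : List Char) (p : Char),
    PySem.List.pyGet? buf (-1) = some p → t.foldl stepA buf = buf ++ emitSep p t := by
  induction t with
  | nil => intro buf p _; simp [emitSep]
  | cons c t ih =>
    intro buf p h
    have hstep := stepA_eq buf p c h
    have hlast : PySem.List.pyGet? ((buf ++ sepB p c) ++ [c]) (-1) = some c :=
      pyGet_neg_one_concat _ c
    simp only [List.foldl_cons, hstep, ih _ c hlast, emitSep]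
    simp

-- shape of a pass on a nonempty list: head is preserved
theorem sepPass_cons (cls : List Char) (sep : Char) (a : Char) (t : List Char) :
    ∃ r, sepPass cls sep (a :: t) = a :: r := by
  cases t with
  | nil => exact ⟨[], rfl⟩
  | cons b t =>
    rw [sepPass_two]
    split_ifs <;> exact ⟨_, rfl⟩

-- the two staged passes produce exactly what A's loop emits after the seed
theorem staged_eq_emitSep (t : List Char) : ∀ (p : Char),
    sepPass evensA '*' (sepPass oddsA '-' (p :: t)) = p :: emitSep p t := by
  induction t with
  | nil => intro p; rfl
  | cons c t ih =>
    intro p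
    obtain ⟨r, hr⟩ := sepPass_cons oddsA '-' c t
    by_cases ho : p ∈ oddsA ∧ c ∈ oddsA
    · -- dash inserted; '-' is in neither class
      have h1 : sepPass oddsA '-' (p :: c :: t) = p :: '-' :: sepPass oddsA '-' (c :: t) := by
        rw [sepPass_two]; simp [ho.1, ho.2]
      rw [h1, hr]
      have h2 : sepPass evensA '*' (p :: '-' :: c :: r) = p :: sepPass evensA '*' ('-' :: c :: r) := by
        rw [sepPass_two]
        have : ('-' : Char) ∉ evensA := by decide
        simp [this]
      have h3 : sepPass evensA '*' ('-' :: c :: r) = '-' :: sepPass evensA '*' (c :: r) := by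
        rw [sepPass_two]
        have : ('-' : Char) ∉ evensA := by decide
        simp [this]
      rw [h2, h3, ← hr, ih c]
      have hodd_not_even : c ∈ oddsA → c ∉ evensA := by
        intro h; fin_cases h <;> decide
      simp [emitSep, sepB, ho.1, ho.2]
    · -- no dash between p and c
      have h1 : sepPass oddsA '-' (p :: c :: t) = p :: sepPass oddsA '-' (c :: t) := by
        rw [sepPass_two]
        rcases Decidable.not_and_iff_not_or_not.mp (by exact fun hc => ho ⟨hc.1, hc.2⟩) with h | h <;> simp [h]
      rw [h1, hr]
      by_cases he : p ∈ evensA ∧ c ∈ evensA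
      · have h2 : sepPass evensA '*' (p :: c :: r) = p :: '*' :: sepPass evensA '*' (c :: r) := by
          rw [sepPass_two]; simp [he.1, he.2]
        rw [h2, ← hr, ih c]
        have hco : c ∉ oddsA := by
          have := he.2; fin_cases this <;> decide
        simp [emitSep, sepB, hco, he.1, he.2]
      · have h2 : sepPass evensA '*' (p :: c :: r) = p :: sepPass evensA '*' (c :: r) := by
          rw [sepPass_two]
          rcases Decidable.not_and_iff_not_or_not.mp (by exact fun hc => he ⟨hc.1, hc.2⟩) with h | h <;> simp [h]
        rw [h2, ← hr, ih c]
        have : sepB p c = [] := by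
          unfold sepB
          have h1' : ¬ (c ∈ oddsA ∧ p ∈ oddsA) := fun hc => ho ⟨hc.2, hc.1⟩
          have h2' : ¬ (c ∈ evensA ∧ p ∈ evensA) := fun hc => he ⟨hc.2, hc.1⟩
          simp [h1', h2']
        simp [emitSep, this]

-- ===== VERDICT =====
theorem DashInsertII_spec : Claim_equal_DashInsertII := by
  intro num _
  unfold Spec_DashInsertII DashInsertII DashInsertII_alt
  cases h : PySem.Int.toChars num with
  | nil => rfl
  | cons hd t =>
    have hseed : PySem.List.pyGet? ([hd] : List Char) (-1) = some hd :=
      pyGet_neg_one_concat [] hd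
    have hslice : PySem.List.slice (hd :: t) (some 1) none = t := by
      simp [PySem.List.slice_from]
    show String.ofList (List.foldl stepA [hd] (PySem.List.slice (hd :: t) (some 1) none)) =
      String.ofList (sepPass ['2', '4', '6', '8'] '*' (sepPass ['1', '3', '5', '7', '9'] '-' (hd :: t)))
    rw [hslice, foldl_stepA t [hd] hd hseed]
    have := staged_eq_emitSep t hd
    simp only [oddsA, evensA] at this
    rw [this]
    simp
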